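-- pv_equiv track=rewrite | github.com/rc-mikeoneil/QueryForge | src/queryforge/platforms/cql/migrate_how_tos_best_practices.py | categorize_by_tags
-- ===== SOURCE A (Python) =====
-- from typing import Dict, List, Any
--
-- def categorize_by_tags(tags: List[str]) -> str:
--     """Infer category from tags."""
--     tag_lower = [t.lower() for t in tags]
--
--     if any(t in tag_lower for t in ['integration', 'cribl', 'crowdstream', 'ingest', 'shipper']):
--         return "integration"
--     elif any(t in tag_lower for t in ['admin', 'user', 'graphql', 'api']):
--         return "admin"
--     elif any(t in tag_lower for t in ['performance', 'optimization', 'speed']):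
--         return "performance"
--     elif any(t in tag_lower for t in ['security', 'detection', 'alert']):
--         return "security"
--     elif any(t in tag_lower for t in ['query', 'search', 'cql', 'logscale']):
--         return "query"
--     else:
--         return "general"
-- ===== SOURCE B (Python) =====
-- CATEGORIES = ["integration", "admin", "performance", "security", "query", "general"]
--
-- KEYWORD_RANK = {
--     'integration': 0, 'cribl': 0, 'crowdstream': 0, 'ingest': 0, 'shipper': 0,
--     'admin': 1, 'user': 1, 'graphql': 1, 'api': 1,
--     'performance': 2, 'optimization': 2, 'speed': 2,
--     'security': 3, 'detection': 3, 'alert': 3,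
--     'query': 4, 'search': 4, 'cql': 4, 'logscale': 4,
-- }
--
-- def categorize_by_tags(tags):
--     """Infer category from tags: minimum priority over an inverted keyword index."""
--     best = 5
--     for t in tags:
--         best = min(best, KEYWORD_RANK.get(t.lower(), 5))
--     return CATEGORIES[best]
-- ===== Notes on version B (the rewrite author's own statement) =====
-- stated objective: alternative
-- what changed: Replaces the if/elif chain of per-category membership scans with an inverted keyword-to-priority dictionary: one pass over the tags keeps the minimum priority seen, and the category name is looked up by that index at the end.
import Mathlib
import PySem

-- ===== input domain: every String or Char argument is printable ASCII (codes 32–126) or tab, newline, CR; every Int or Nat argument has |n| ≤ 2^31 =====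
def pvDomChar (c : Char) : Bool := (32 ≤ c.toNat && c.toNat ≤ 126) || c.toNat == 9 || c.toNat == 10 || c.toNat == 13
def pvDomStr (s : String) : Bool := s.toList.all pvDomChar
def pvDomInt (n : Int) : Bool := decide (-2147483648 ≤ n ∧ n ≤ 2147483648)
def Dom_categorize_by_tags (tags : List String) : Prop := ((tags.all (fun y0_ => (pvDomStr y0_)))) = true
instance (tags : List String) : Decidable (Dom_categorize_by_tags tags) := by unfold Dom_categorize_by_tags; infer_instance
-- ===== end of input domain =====

-- B inverts A's structure: a keyword→priority index, one pass over the tags keeping the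
-- minimum priority, and an indexed lookup of the category name (objective: alternative).


-- ===== PORT A =====
def categorize_by_tags (tags : List String) : String :=
  let tag_lower := tags.map PySem.Str.lower
  if ["integration", "cribl", "crowdstream", "ingest", "shipper"].any (fun t => tag_lower.contains t) then
    "integration"
  else if ["admin", "user", "graphql", "api"].any (fun t => tag_lower.contains t) then
    "admin"
  else if ["performance", "optimization", "speed"].any (fun t => tag_lower.contains t) then
    "performance"
  else if ["security", "detection", "alert"].any (fun t => tag_lower.contains t) then
    "security"
  else if ["query", "search", "cql", "logscale"].any (fun t => tag_lower.contains t) then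
    "query"
  else
    "general"

-- ===== PORT B =====
def pvCategories : List String :=
  ["integration", "admin", "performance", "security", "query", "general"]

-- literal dict with distinct keys: represented directly as its item list
def pvKeywordRank : PySem.Dict String Int :=
  PySem.Dict.mk
    [("integration", 0), ("cribl", 0), ("crowdstream", 0), ("ingest", 0), ("shipper", 0),
     ("admin", 1), ("user", 1), ("graphql", 1), ("api", 1),
     ("performance", 2), ("optimization", 2), ("speed", 2),
     ("security", 3), ("detection", 3), ("alert", 3),
     ("query", 4), ("search", 4), ("cql", 4), ("logscale", 4)]

def categorize_by_tags_alt (tags : List String) : String :=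
  let best : Int :=
    tags.foldl (fun best t => min best (pvKeywordRank.getD (PySem.Str.lower t) 5)) 5
  PySem.List.pyGetD pvCategories best ""   -- CATEGORIES[best]; 0 ≤ best ≤ 5 always (proved below)

-- ===== PRECONDITION & SPEC =====
def Spec_categorize_by_tags (tags : List String) (out : String) : Prop := out = categorize_by_tags_alt tags
instance (tags : List String) (out : String) : Decidable (Spec_categorize_by_tags tags out) := by unfold Spec_categorize_by_tags; infer_instance

-- ===== CLAIM (what is proved, stated in full; the proofs are below) =====
def Claim_equal_categorize_by_tags : Prop := ∀ (tags : List String), Dom_categorize_by_tags tags → Spec_categorize_by_tags tags (categorize_by_tags tags)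

-- ===== LEMMAS AND PROOFS =====

-- The per-string rank B looks up, written as A's five membership tests in order.
theorem pvRank_eq (s : String) :
    pvKeywordRank.getD s 5 =
      (if ["integration", "cribl", "crowdstream", "ingest", "shipper"].contains s then 0
       else if ["admin", "user", "graphql", "api"].contains s then 1
       else if ["performance", "optimization", "speed"].contains s then 2
       else if ["security", "detection", "alert"].contains s then 3
       else if ["query", "search", "cql", "logscale"].contains s then 4
       else 5) := by
  simp only [pvKeywordRank, PySem.Dict.getD_eq_get?_getD, PySem.Dict.get?_mk_cons]
  by_cases h1 : s = "integration"
  · subst h1; decide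
  rw [if_neg (show ¬(("integration" == s) = true) from by simp only [beq_iff_eq]; exact fun h => h1 h.symm)]
  by_cases h2 : s = "cribl"
  · subst h2; decide
  rw [if_neg (show ¬(("cribl" == s) = true) from by simp only [beq_iff_eq]; exact fun h => h2 h.symm)]
  by_cases h3 : s = "crowdstream"
  · subst h3; decide
  rw [if_neg (show ¬(("crowdstream" == s) = true) from by simp only [beq_iff_eq]; exact fun h => h3 h.symm)]
  by_cases h4 : s = "ingest"
  · subst h4; decide
  rw [if_neg (show ¬(("ingest" == s) = true) from by simp only [beq_iff_eq]; exact fun h => h4 h.symm)]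
  by_cases h5 : s = "shipper"
  · subst h5; decide
  rw [if_neg (show ¬(("shipper" == s) = true) from by simp only [beq_iff_eq]; exact fun h => h5 h.symm)]
  by_cases h6 : s = "admin"
  · subst h6; decide
  rw [if_neg (show ¬(("admin" == s) = true) from by simp only [beq_iff_eq]; exact fun h => h6 h.symm)]
  by_cases h7 : s = "user"
  · subst h7; decide
  rw [if_neg (show ¬(("user" == s) = true) from by simp only [beq_iff_eq]; exact fun h => h7 h.symm)]
  by_cases h8 : s = "graphql"
  · subst h8; decide
  rw [if_neg (show ¬(("graphql" == s) = true) from by simp only [beq_iff_eq]; exact fun h => h8 h.symm)]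
  by_cases h9 : s = "api"
  · subst h9; decide
  rw [if_neg (show ¬(("api" == s) = true) from by simp only [beq_iff_eq]; exact fun h => h9 h.symm)]
  by_cases h10 : s = "performance"
  · subst h10; decide
  rw [if_neg (show ¬(("performance" == s) = true) from by simp only [beq_iff_eq]; exact fun h => h10 h.symm)]
  by_cases h11 : s = "optimization"
  · subst h11; decide
  rw [if_neg (show ¬(("optimization" == s) = true) from by simp only [beq_iff_eq]; exact fun h => h11 h.symm)]
  by_cases h12 : s = "speed"
  · subst h12; decide
  rw [if_neg (show ¬(("speed" == s) = true) from by simp only [beq_iff_eq]; exact fun h => h12 h.symm)]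
  by_cases h13 : s = "security"
  · subst h13; decide
  rw [if_neg (show ¬(("security" == s) = true) from by simp only [beq_iff_eq]; exact fun h => h13 h.symm)]
  by_cases h14 : s = "detection"
  · subst h14; decide
  rw [if_neg (show ¬(("detection" == s) = true) from by simp only [beq_iff_eq]; exact fun h => h14 h.symm)]
  by_cases h15 : s = "alert"
  · subst h15; decide
  rw [if_neg (show ¬(("alert" == s) = true) from by simp only [beq_iff_eq]; exact fun h => h15 h.symm)]
  by_cases h16 : s = "query"
  · subst h16; decide
  rw [if_neg (show ¬(("query" == s) = true) from by simp only [beq_iff_eq]; exact fun h => h16 h.symm)]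
  by_cases h17 : s = "search"
  · subst h17; decide
  rw [if_neg (show ¬(("search" == s) = true) from by simp only [beq_iff_eq]; exact fun h => h17 h.symm)]
  by_cases h18 : s = "cql"
  · subst h18; decide
  rw [if_neg (show ¬(("cql" == s) = true) from by simp only [beq_iff_eq]; exact fun h => h18 h.symm)]
  by_cases h19 : s = "logscale"
  · subst h19; decide
  rw [if_neg (show ¬(("logscale" == s) = true) from by simp only [beq_iff_eq]; exact fun h => h19 h.symm)]
  simp [h1, h2, h3, h4, h5, h6, h7, h8, h9, h10, h11, h12, h13, h14, h15, h16, h17, h18, h19, PySem.Dict.get?]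


-- any(kw in tag_lower for kw in g) said per tag: some tag's lowering lies in g.
theorem pvCond_iff (g tags : List String) :
    ((g.any fun t => (tags.map PySem.Str.lower).contains t) = true) ↔
      ∃ x ∈ tags, g.contains (PySem.Str.lower x) = true := by
  simp only [List.any_eq_true, List.contains_eq_mem, List.mem_map, decide_eq_true_eq]
  aesop

theorem pvFoldMin_le_init (f : String → Int) (l : List String) (init : Int) :
    l.foldl (fun b t => min b (f t)) init ≤ init := by
  induction l generalizing init with
  | nil => simp
  | cons x xs ih => exact le_trans (ih _) (min_le_left _ _)

theorem pvFoldMin_le_mem (f : String → Int) (l : List String) (init : Int) (x : String)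
    (hx : x ∈ l) : l.foldl (fun b t => min b (f t)) init ≤ f x := by
  induction l generalizing init with
  | nil => cases hx
  | cons y ys ih =>
    rcases List.mem_cons.mp hx with h | h
    · subst h
      exact le_trans (pvFoldMin_le_init f ys _) (min_le_right _ _)
    · exact ih _ h

theorem pvFoldMin_ge (f : String → Int) (l : List String) (init a : Int)
    (h : ∀ t ∈ l, a ≤ f t) (ha : a ≤ init) :
    a ≤ l.foldl (fun b t => min b (f t)) init := by
  induction l generalizing init with
  | nil => simpa
  | cons y ys ih =>
    exact ih _ (fun t ht => h t (List.mem_cons_of_mem _ ht))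
      (le_min ha (h y List.mem_cons_self))

theorem pvRank_nonneg (s : String) : 0 ≤ pvKeywordRank.getD s 5 := by
  rw [pvRank_eq]; split_ifs <;> norm_num

-- ===== VERDICT (by name: the statement is the Claim_ definition above) =====
theorem categorize_by_tags_spec : Claim_equal_categorize_by_tags := by
  intro tags _
  show categorize_by_tags tags = categorize_by_tags_alt tags
  have hA : categorize_by_tags tags = (if ((["integration", "cribl", "crowdstream", "ingest", "shipper"].any fun t => (tags.map PySem.Str.lower).contains t) = true) then "integration" else (if ((["admin", "user", "graphql", "api"].any fun t => (tags.map PySem.Str.lower).contains t) = true) then "admin" else (if ((["performance", "optimization", "speed"].any fun t => (tags.map PySem.Str.lower).contains t) = true) then "performance" else (if ((["security", "detection", "alert"].any fun t => (tags.map PySem.Str.lower).contains t) = true) then "security" else (if ((["query", "search", "cql", "logscale"].any fun t => (tags.map PySem.Str.lower).contains t) = true) then "query" else "general"))))) := rfl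
  have hB : categorize_by_tags_alt tags =
      PySem.List.pyGetD pvCategories
        (tags.foldl (fun best t => min best (pvKeywordRank.getD (PySem.Str.lower t) 5)) 5) "" := rfl
  rw [hA, hB]
  by_cases hc0 : ∃ x ∈ tags, (["integration", "cribl", "crowdstream", "ingest", "shipper"] : List String).contains (PySem.Str.lower x) = true
  · obtain ⟨x, hx, hgx⟩ := hc0
    have hm : tags.foldl (fun best t => min best (pvKeywordRank.getD (PySem.Str.lower t) 5)) 5 = 0 := by
      refine le_antisymm ?_ ?_
      · refine le_trans (pvFoldMin_le_mem _ _ _ x hx) ?_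
        rw [pvRank_eq]
        simp_all
      · exact pvFoldMin_ge _ _ _ _ (fun t _ => pvRank_nonneg _) (by norm_num)
    rw [if_pos ((pvCond_iff _ _).mpr ⟨x, hx, hgx⟩), hm]
    decide
  by_cases hc1 : ∃ x ∈ tags, (["admin", "user", "graphql", "api"] : List String).contains (PySem.Str.lower x) = true
  · obtain ⟨x, hx, hgx⟩ := hc1
    have hm : tags.foldl (fun best t => min best (pvKeywordRank.getD (PySem.Str.lower t) 5)) 5 = 1 := by
      refine le_antisymm ?_ ?_
      · refine le_trans (pvFoldMin_le_mem _ _ _ x hx) ?_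
        rw [pvRank_eq]
        split_ifs <;> norm_num
      · refine pvFoldMin_ge _ _ _ _ (fun t ht => ?_) (by norm_num)
        have n0 : ¬ ((["integration", "cribl", "crowdstream", "ingest", "shipper"] : List String).contains (PySem.Str.lower t) = true) := fun h => hc0 ⟨t, ht, h⟩
        rw [pvRank_eq]
        split_ifs <;> norm_num
    rw [if_neg (fun h => hc0 ((pvCond_iff _ _).mp h))]
    rw [if_pos ((pvCond_iff _ _).mpr ⟨x, hx, hgx⟩), hm]
    decide
  by_cases hc2 : ∃ x ∈ tags, (["performance", "optimization", "speed"] : List String).contains (PySem.Str.lower x) = true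
  · obtain ⟨x, hx, hgx⟩ := hc2
    have hm : tags.foldl (fun best t => min best (pvKeywordRank.getD (PySem.Str.lower t) 5)) 5 = 2 := by
      refine le_antisymm ?_ ?_
      · refine le_trans (pvFoldMin_le_mem _ _ _ x hx) ?_
        rw [pvRank_eq]
        split_ifs <;> norm_num
      · refine pvFoldMin_ge _ _ _ _ (fun t ht => ?_) (by norm_num)
        have n0 : ¬ ((["integration", "cribl", "crowdstream", "ingest", "shipper"] : List String).contains (PySem.Str.lower t) = true) := fun h => hc0 ⟨t, ht, h⟩
        have n1 : ¬ ((["admin", "user", "graphql", "api"] : List String).contains (PySem.Str.lower t) = true) := fun h => hc1 ⟨t, ht, h⟩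
        rw [pvRank_eq]
        split_ifs <;> norm_num
    rw [if_neg (fun h => hc0 ((pvCond_iff _ _).mp h))]
    rw [if_neg (fun h => hc1 ((pvCond_iff _ _).mp h))]
    rw [if_pos ((pvCond_iff _ _).mpr ⟨x, hx, hgx⟩), hm]
    decide
  by_cases hc3 : ∃ x ∈ tags, (["security", "detection", "alert"] : List String).contains (PySem.Str.lower x) = true
  · obtain ⟨x, hx, hgx⟩ := hc3
    have hm : tags.foldl (fun best t => min best (pvKeywordRank.getD (PySem.Str.lower t) 5)) 5 = 3 := by
      refine le_antisymm ?_ ?_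
      · refine le_trans (pvFoldMin_le_mem _ _ _ x hx) ?_
        rw [pvRank_eq]
        split_ifs <;> norm_num
      · refine pvFoldMin_ge _ _ _ _ (fun t ht => ?_) (by norm_num)
        have n0 : ¬ ((["integration", "cribl", "crowdstream", "ingest", "shipper"] : List String).contains (PySem.Str.lower t) = true) := fun h => hc0 ⟨t, ht, h⟩
        have n1 : ¬ ((["admin", "user", "graphql", "api"] : List String).contains (PySem.Str.lower t) = true) := fun h => hc1 ⟨t, ht, h⟩
        have n2 : ¬ ((["performance", "optimization", "speed"] : List String).contains (PySem.Str.lower t) = true) := fun h => hc2 ⟨t, ht, h⟩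
        rw [pvRank_eq]
        split_ifs <;> norm_num
    rw [if_neg (fun h => hc0 ((pvCond_iff _ _).mp h))]
    rw [if_neg (fun h => hc1 ((pvCond_iff _ _).mp h))]
    rw [if_neg (fun h => hc2 ((pvCond_iff _ _).mp h))]
    rw [if_pos ((pvCond_iff _ _).mpr ⟨x, hx, hgx⟩), hm]
    decide
  by_cases hc4 : ∃ x ∈ tags, (["query", "search", "cql", "logscale"] : List String).contains (PySem.Str.lower x) = true
  · obtain ⟨x, hx, hgx⟩ := hc4
    have hm : tags.foldl (fun best t => min best (pvKeywordRank.getD (PySem.Str.lower t) 5)) 5 = 4 := by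
      refine le_antisymm ?_ ?_
      · refine le_trans (pvFoldMin_le_mem _ _ _ x hx) ?_
        rw [pvRank_eq]
        split_ifs <;> norm_num
      · refine pvFoldMin_ge _ _ _ _ (fun t ht => ?_) (by norm_num)
        have n0 : ¬ ((["integration", "cribl", "crowdstream", "ingest", "shipper"] : List String).contains (PySem.Str.lower t) = true) := fun h => hc0 ⟨t, ht, h⟩
        have n1 : ¬ ((["admin", "user", "graphql", "api"] : List String).contains (PySem.Str.lower t) = true) := fun h => hc1 ⟨t, ht, h⟩
        have n2 : ¬ ((["performance", "optimization", "speed"] : List String).contains (PySem.Str.lower t) = true) := fun h => hc2 ⟨t, ht, h⟩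
        have n3 : ¬ ((["security", "detection", "alert"] : List String).contains (PySem.Str.lower t) = true) := fun h => hc3 ⟨t, ht, h⟩
        rw [pvRank_eq]
        split_ifs <;> norm_num
    rw [if_neg (fun h => hc0 ((pvCond_iff _ _).mp h))]
    rw [if_neg (fun h => hc1 ((pvCond_iff _ _).mp h))]
    rw [if_neg (fun h => hc2 ((pvCond_iff _ _).mp h))]
    rw [if_neg (fun h => hc3 ((pvCond_iff _ _).mp h))]
    rw [if_pos ((pvCond_iff _ _).mpr ⟨x, hx, hgx⟩), hm]
    decide
  · have hm : tags.foldl (fun best t => min best (pvKeywordRank.getD (PySem.Str.lower t) 5)) 5 = 5 := by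
      refine le_antisymm (pvFoldMin_le_init _ _ _) ?_
      refine pvFoldMin_ge _ _ _ _ (fun t ht => ?_) le_rfl
      have n0 : ¬ ((["integration", "cribl", "crowdstream", "ingest", "shipper"] : List String).contains (PySem.Str.lower t) = true) := fun h => hc0 ⟨t, ht, h⟩
      have n1 : ¬ ((["admin", "user", "graphql", "api"] : List String).contains (PySem.Str.lower t) = true) := fun h => hc1 ⟨t, ht, h⟩
      have n2 : ¬ ((["performance", "optimization", "speed"] : List String).contains (PySem.Str.lower t) = true) := fun h => hc2 ⟨t, ht, h⟩
      have n3 : ¬ ((["security", "detection", "alert"] : List String).contains (PySem.Str.lower t) = true) := fun h => hc3 ⟨t, ht, h⟩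
      have n4 : ¬ ((["query", "search", "cql", "logscale"] : List String).contains (PySem.Str.lower t) = true) := fun h => hc4 ⟨t, ht, h⟩
      rw [pvRank_eq]
      split_ifs
      norm_num
    rw [if_neg (fun h => hc0 ((pvCond_iff _ _).mp h))]
    rw [if_neg (fun h => hc1 ((pvCond_iff _ _).mp h))]
    rw [if_neg (fun h => hc2 ((pvCond_iff _ _).mp h))]
    rw [if_neg (fun h => hc3 ((pvCond_iff _ _).mp h))]
    rw [if_neg (fun h => hc4 ((pvCond_iff _ _).mp h))]
    rw [hm]
    decide
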